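-- pv_equiv track=rewrite | github.com/ishamibrahim/BasicProgramming | Competitive/count_carry_numbers_tptal.py | number_of_carry_operations
-- ===== SOURCE A (Python) =====
-- def number_of_carry_operations(num1: int, num2: int):
--     carry_count = 0
--     carry = 0
--     add1 = add2 = 0
--     while True:
--         if num1 and num2:
--             add1 = num1 % 10
--             add2 = num2 % 10
--             num1 = num1 // 10
--             num2 = num2 // 10
--
--         elif num1 or num2:
--             if num1:
--                 add1 = num1 % 10
--                 add2 = 0
--                 num1 = num1 // 10
--             elif num2:
--                 add2 = num2 % 10
--                 add1 = 0
--                 num2 = num2 // 10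
--         else:
--             break
--         if add1 + add2 + carry > 9:
--             carry = 1
--             carry_count += 1
--         else:
--             carry = 0
--     return carry_count
-- ===== SOURCE B (Python) =====
-- def number_of_carry_operations(num1: int, num2: int):
--     def helper(a, b, carry):
--         if not a and not b:
--             return 0
--         c = 1 if a % 10 + b % 10 + carry > 9 else 0
--         return c + helper(a // 10, b // 10, c)
--     return helper(num1, num2, 0)
-- ===== Notes on version B (the rewrite author's own statement) =====
-- stated objective: simpler
-- what changed: Replaces A's while-True loop with mutable carry/count accumulators and three explicit operand-exhaustion branches by a short recursive helper on the carry recurrence that sums the carries on the way back.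
import Mathlib
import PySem

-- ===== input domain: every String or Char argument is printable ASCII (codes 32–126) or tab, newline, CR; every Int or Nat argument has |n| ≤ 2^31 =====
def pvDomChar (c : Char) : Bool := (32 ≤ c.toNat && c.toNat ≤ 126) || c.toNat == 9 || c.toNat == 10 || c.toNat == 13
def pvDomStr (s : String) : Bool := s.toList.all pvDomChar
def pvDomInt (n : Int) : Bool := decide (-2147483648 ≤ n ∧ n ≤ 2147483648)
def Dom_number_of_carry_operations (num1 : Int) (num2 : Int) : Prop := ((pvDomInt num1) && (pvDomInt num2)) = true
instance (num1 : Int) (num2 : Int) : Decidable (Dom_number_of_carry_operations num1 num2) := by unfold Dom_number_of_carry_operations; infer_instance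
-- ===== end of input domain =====

-- B changes only the decomposition (recursive carry recurrence instead of A's iterative
-- accumulator loop with three operand-exhaustion branches); return values are identical wherever Python A returns (both diverge on negative input).

-- ===== PORT A =====
-- A's `while True` loop; fuel only makes the loop total (wherever Python A terminates the fuel given below
-- always suffices, since num1+num2 strictly decreases each iteration).
def pvLoopA : Nat → Int → Int → Int → Int → Int
  | 0, _, _, _, carry_count => carry_count
  | fuel + 1, num1, num2, carry, carry_count =>
    if num1 ≠ 0 ∧ num2 ≠ 0 then
      let add1 := PySem.Int.mod num1 10
      let add2 := PySem.Int.mod num2 10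
      let n1 := PySem.Int.floordiv num1 10
      let n2 := PySem.Int.floordiv num2 10
      if add1 + add2 + carry > 9 then pvLoopA fuel n1 n2 1 (carry_count + 1)
      else pvLoopA fuel n1 n2 0 carry_count
    else if num1 ≠ 0 ∨ num2 ≠ 0 then
      if num1 ≠ 0 then
        let add1 := PySem.Int.mod num1 10
        let n1 := PySem.Int.floordiv num1 10
        if add1 + 0 + carry > 9 then pvLoopA fuel n1 num2 1 (carry_count + 1)
        else pvLoopA fuel n1 num2 0 carry_count
      else
        let add2 := PySem.Int.mod num2 10
        let n2 := PySem.Int.floordiv num2 10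
        if 0 + add2 + carry > 9 then pvLoopA fuel num1 n2 1 (carry_count + 1)
        else pvLoopA fuel num1 n2 0 carry_count
    else carry_count

def number_of_carry_operations (num1 : Int) (num2 : Int) : Int :=
  pvLoopA (num1.natAbs + num2.natAbs + 1) num1 num2 0 0

-- ===== PORT B =====
-- B's recursive helper; same fuel-for-totality note as for A.
def pvHelperB : Nat → Int → Int → Int → Int
  | 0, _, _, _ => 0
  | fuel + 1, a, b, carry =>
    if a = 0 ∧ b = 0 then 0
    else
      let c : Int := if PySem.Int.mod a 10 + PySem.Int.mod b 10 + carry > 9 then 1 else 0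
      c + pvHelperB fuel (PySem.Int.floordiv a 10) (PySem.Int.floordiv b 10) c

def number_of_carry_operations_alt (num1 : Int) (num2 : Int) : Int :=
  pvHelperB (num1.natAbs + num2.natAbs + 1) num1 num2 0

-- ===== PRECONDITION & SPEC =====
def Spec_number_of_carry_operations (num1 : Int) (num2 : Int) (out : Int) : Prop := out = number_of_carry_operations_alt num1 num2
instance (num1 : Int) (num2 : Int) (out : Int) : Decidable (Spec_number_of_carry_operations num1 num2 out) := by unfold Spec_number_of_carry_operations; infer_instance

-- ===== CLAIM (what is proved, stated in full; the proofs are below) =====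
def Claim_equal_number_of_carry_operations : Prop := ∀ (num1 : Int) (num2 : Int), Dom_number_of_carry_operations num1 num2 → Spec_number_of_carry_operations num1 num2 (number_of_carry_operations num1 num2)

-- ===== LEMMAS AND PROOFS =====

-- For equal fuel the two loop bodies agree step for step (B's uniform 0-fill coincides
-- with A's three branches because x % 10 = 0 and x // 10 = 0 when x = 0).
theorem pvLoopA_eq_helperB (fuel : Nat) :
    ∀ (n1 n2 carry cnt : Int),
      pvLoopA fuel n1 n2 carry cnt = cnt + pvHelperB fuel n1 n2 carry := by
  induction fuel with
  | zero => intro n1 n2 carry cnt; simp [pvLoopA, pvHelperB]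
  | succ f ih =>
    intro n1 n2 carry cnt
    have hm0 : PySem.Int.mod 0 10 = 0 := by decide
    have hd0 : PySem.Int.floordiv 0 10 = 0 := by decide
    by_cases h1 : n1 = 0 <;> by_cases h2 : n2 = 0 <;>
      simp only [pvLoopA, pvHelperB, h1, h2, hm0, hd0] <;>
      split_ifs <;>
      first
        | tauto
        | omega
        | (rw [ih]; ring)

-- ===== VERDICT (by name: the statement is the Claim_ definition above) =====
theorem number_of_carry_operations_spec : Claim_equal_number_of_carry_operations := by
  intro num1 num2 _
  unfold Spec_number_of_carry_operations number_of_carry_operations number_of_carry_operations_alt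
  rw [pvLoopA_eq_helperB]
  ring
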